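-- pv_equiv track=rewrite | github.com/poom6336/MiniProject_Group12_T1_2025 | group12_T1.py | priority_sort
-- ===== SOURCE A (Python) =====
-- def priority_sort(data):
--     sec_list = []
--     lab_list = []
--
--     for row in data:
--         if row["Type"] == "Sec":
--             sec_list.append(row)
--         else:
--             lab_list.append(row)
--
--     return sec_list + lab_list
-- ===== SOURCE B (Python) =====
-- def priority_sort(data):
--     return sorted(data, key=lambda row: 0 if row["Type"] == "Sec" else 1)
-- ===== Notes on version B (the rewrite author's own statement) =====
-- stated objective: idiomatic
-- what changed: Replaces the two-list partition-and-concatenate loop with a single stable sort on a binary 0/1 key (Sec first); Python's stable sort preserves within-group order, giving the identical result.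
import Mathlib
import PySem

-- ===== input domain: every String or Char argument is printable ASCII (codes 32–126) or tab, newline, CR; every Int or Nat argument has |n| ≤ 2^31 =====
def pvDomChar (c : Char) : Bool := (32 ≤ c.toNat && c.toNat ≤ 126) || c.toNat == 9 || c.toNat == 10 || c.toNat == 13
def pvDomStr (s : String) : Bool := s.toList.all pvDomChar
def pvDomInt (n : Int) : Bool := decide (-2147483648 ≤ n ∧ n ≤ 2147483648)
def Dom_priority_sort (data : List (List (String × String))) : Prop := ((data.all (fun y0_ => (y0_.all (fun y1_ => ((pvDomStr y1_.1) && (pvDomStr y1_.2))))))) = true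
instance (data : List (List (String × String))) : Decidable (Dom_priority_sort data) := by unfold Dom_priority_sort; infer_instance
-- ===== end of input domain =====

-- B replaces A's partition-and-concatenate loop by one stable sort on a binary Sec-first key (idiomatic; same result).


-- row["Type"] : first-match association-list lookup (Python dict access; none = KeyError, excluded by Pre_)
def rowType? (row : List (String × String)) : Option String :=
  (row.find? (fun p => p.1 == "Type")).map (·.2)

-- ===== PORT A =====
def priority_sort (data : List (List (String × String))) : List (List (String × String)) :=
  let p := data.foldl
    (fun (acc : List (List (String × String)) × List (List (String × String))) row =>
      if rowType? row == some "Sec" then (acc.1 ++ [row], acc.2) else (acc.1, acc.2 ++ [row]))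
    ([], [])
  p.1 ++ p.2

-- ===== PORT B =====
def secKey (row : List (String × String)) : Int :=
  if rowType? row == some "Sec" then 0 else 1

def priority_sort_alt (data : List (List (String × String))) : List (List (String × String)) :=
  PySem.List.sorted data secKey false

-- ===== PRECONDITION & SPEC =====
-- Pre_ excludes rows without a "Type" key, on which Python A raises KeyError.
def Pre_priority_sort (data : List (List (String × String))) : Prop :=
  (data.all (fun row => row.any (fun p => p.1 == "Type"))) = true
instance (data : List (List (String × String))) : Decidable (Pre_priority_sort data) := by
  unfold Pre_priority_sort; infer_instance

def pvWitness_priority_sort : (List (List (String × String))) :=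
  [[("Type", "Lab")], [("Type", "Sec")]]

def Spec_priority_sort (data : List (List (String × String))) (out : List (List (String × String))) : Prop := out = priority_sort_alt data
instance (data : List (List (String × String))) (out : List (List (String × String))) : Decidable (Spec_priority_sort data out) := by unfold Spec_priority_sort; infer_instance

-- ===== CLAIM (what is proved, stated in full; the proofs are below) =====
def Claim_equal_priority_sort : Prop := ∀ (data : List (List (String × String))), Dom_priority_sort data → Pre_priority_sort data → Spec_priority_sort data (priority_sort data)

-- ===== LEMMAS AND PROOFS =====

-- A's loop, characterised: partition into filtered halves.
theorem A_loop (xs : List (List (String × String)))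
    (s l : List (List (String × String))) :
    xs.foldl
      (fun (acc : List (List (String × String)) × List (List (String × String))) row =>
        if rowType? row == some "Sec" then (acc.1 ++ [row], acc.2) else (acc.1, acc.2 ++ [row]))
      (s, l)
    = (s ++ xs.filter (fun row => rowType? row == some "Sec"),
       l ++ xs.filter (fun row => !(rowType? row == some "Sec"))) := by
  induction xs generalizing s l with
  | nil => simp
  | cons x xs ih =>
    rw [List.foldl_cons]
    by_cases hx : rowType? x == some "Sec"
    · rw [if_pos hx, ih]; simp [List.filter_cons, hx]
    · rw [if_neg hx, ih]; simp [List.filter_cons, hx]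

-- insertBy walks past a prefix it never inserts before
theorem insertBy_skip (before : List (String × String) → List (String × String) → Bool)
    (x : List (String × String)) (s l : List (List (String × String)))
    (hs : ∀ a ∈ s, before x a = false) :
    PySem.List.insertBy (fun a b => before a b) x (s ++ l)
      = s ++ PySem.List.insertBy (fun a b => before a b) x l := by
  induction s with
  | nil => simp
  | cons a s ih =>
    have ha := hs a (by simp)
    simp [PySem.List.insertBy, ha, ih (fun a h => hs a (by simp [h]))]

theorem insertBy_append (before : List (String × String) → List (String × String) → Bool)
    (x : List (String × String)) (l : List (List (String × String)))
    (hl : ∀ a ∈ l, before x a = false) :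
    PySem.List.insertBy (fun a b => before a b) x l = l ++ [x] := by
  induction l with
  | nil => simp [PySem.List.insertBy]
  | cons a l ih =>
    have ha := hl a (by simp)
    simp [PySem.List.insertBy, ha, ih (fun a h => hl a (by simp [h]))]

theorem insertBy_front (before : List (String × String) → List (String × String) → Bool)
    (x : List (String × String)) (l : List (List (String × String)))
    (hl : ∀ a ∈ l, before x a = true) :
    PySem.List.insertBy (fun a b => before a b) x l = x :: l := by
  cases l with
  | nil => simp [PySem.List.insertBy]
  | cons a l => simp [PySem.List.insertBy, hl a (by simp)]

-- B's stable insertion sort on the 0/1 key, characterised on a partitioned accumulator.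
theorem B_loop (xs s l : List (List (String × String)))
    (hs : ∀ a ∈ s, secKey a = 0) (hl : ∀ a ∈ l, secKey a = 1) :
    xs.foldl (fun acc x => PySem.List.insertBy (fun a b => decide (secKey a < secKey b)) x acc) (s ++ l)
    = (s ++ xs.filter (fun row => rowType? row == some "Sec"))
      ++ (l ++ xs.filter (fun row => !(rowType? row == some "Sec"))) := by
  induction xs generalizing s l with
  | nil => simp
  | cons x xs ih =>
    by_cases hx : rowType? x == some "Sec"
    · have hk : secKey x = 0 := by simp [secKey, hx]
      have step : PySem.List.insertBy (fun a b => decide (secKey a < secKey b)) x (s ++ l)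
          = (s ++ [x]) ++ l := by
        rw [insertBy_skip _ x s l (fun a ha => by simp [hk, hs a ha]),
            insertBy_front _ x l (fun a ha => by simp [hk, hl a ha])]
        simp
      rw [List.foldl_cons, step, ih (s ++ [x]) l
          (fun a ha => by rcases List.mem_append.mp ha with h | h
                          · exact hs a h
                          · simp at h; simp [h, hk]) hl]
      simp [List.filter_cons, hx]
    · have hk : secKey x = 1 := by simp [secKey, hx]
      have step : PySem.List.insertBy (fun a b => decide (secKey a < secKey b)) x (s ++ l)
          = s ++ (l ++ [x]) := by
        rw [insertBy_skip _ x s l (fun a ha => by simp [hk, hs a ha]),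
            insertBy_append _ x l (fun a ha => by simp [hk, hl a ha])]
      rw [List.foldl_cons, step, ih s (l ++ [x]) hs
          (fun a ha => by rcases List.mem_append.mp ha with h | h
                          · exact hl a h
                          · simp at h; simp [h, hk])]
      simp [List.filter_cons, hx]

-- ===== VERDICT (by name: the statement is the Claim_ definition above) =====
theorem priority_sort_spec : Claim_equal_priority_sort := by
  intro data _ _
  show priority_sort data = priority_sort_alt data
  have hA := A_loop data [] []
  have hB := B_loop data [] [] (by simp) (by simp)
  simp only [List.nil_append, List.append_nil] at hA hB
  simp only [priority_sort, priority_sort_alt, PySem.List.sorted, Bool.false_eq_true, if_false]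
  rw [hA, hB]
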